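-- pv_equiv track=rewrite | github.com/kdedwards/2020-Advent | Day 14/Day14p1.py | getResultantValue
-- ===== SOURCE A (Python) =====
-- def getResultantValue(value, mask):
--     bitValue = bin(value).replace('0b', '')
--     bitValue = '0' * (36 - len(bitValue)) + bitValue
--     resultantBitValue = ''
--     for i in range(0, len(mask)):
--         if mask[i] != 'X':
--             resultantBitValue += mask[i]
--         else:
--             resultantBitValue += bitValue[i]
--     decValue = int(resultantBitValue, 2)
--     return decValue
-- ===== SOURCE B (Python) =====
-- def getResultantValue(value, mask):
--     andmask = int(mask.replace('X', '1'), 2)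
--     ormask = int(mask.replace('X', '0'), 2)
--     return ((value >> (36 - len(mask))) & andmask) | ormask
-- ===== Notes on version B (the rewrite author's own statement) =====
-- stated objective: idiomatic
-- what changed: Replaces the per-character construction of a binary result string over a zero-padded 36-char bit string with two integers (AND mask from X->1, OR mask from X->0) and a single bitwise expression on the top len(mask) bits of the 36-bit value.
-- outside the precondition, e.g. on getResultantValue(-5, 'X'): A returns 0, B returns 1; on getResultantValue(0, '1111111111111111111111111111111111111'): A returns 137438953471, B raises ValueError; on getResultantValue(0, '1_0'): A returns 2, B returns 2
import Mathlib
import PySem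

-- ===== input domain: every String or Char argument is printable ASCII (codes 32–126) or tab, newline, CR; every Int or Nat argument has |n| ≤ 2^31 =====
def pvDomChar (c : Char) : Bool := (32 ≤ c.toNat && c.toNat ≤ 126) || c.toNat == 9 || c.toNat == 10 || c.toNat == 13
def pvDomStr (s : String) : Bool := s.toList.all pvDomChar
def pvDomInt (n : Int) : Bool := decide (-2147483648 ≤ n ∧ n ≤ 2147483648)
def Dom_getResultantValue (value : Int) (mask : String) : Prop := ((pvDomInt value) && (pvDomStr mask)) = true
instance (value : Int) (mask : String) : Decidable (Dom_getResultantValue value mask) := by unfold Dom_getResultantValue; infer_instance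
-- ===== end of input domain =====

-- B replaces A's per-character construction of a binary result string with two integer bitmasks
-- (AND mask from X->'1', OR mask from X->'0') and one bitwise expression on the top len(mask)
-- bits of the 36-bit value (idiomatic rewrite).

-- ===== PORT A =====

-- bin(n) digits for a natural number n (empty for 0; callers handle the 0 case like Python's bin)
def pvBinNat (n : Nat) : List Char :=
  if h : n = 0 then []
  else pvBinNat (n / 2) ++ [if n % 2 = 1 then '1' else '0']
decreasing_by exact Nat.div_lt_self (Nat.pos_of_ne_zero h) (by decide)

-- bin(value).replace('0b',''): sign then digits, '0' for zero (exact for every Int)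
def pvBin (v : Int) : List Char :=
  if v < 0 then '-' :: (if v = 0 then ['0'] else pvBinNat (-v).toNat)
  else if v = 0 then ['0'] else pvBinNat v.toNat

-- int(s, 2), hand-ported: exact when every char of s is '0' or '1' (Pre_ guarantees that;
-- where Python's int would raise ValueError the input is outside Pre_)
def pvParse2 (l : List Char) : Int :=
  l.foldl (fun acc c => acc * 2 + (if c = '1' then 1 else 0)) 0

def getResultantValue (value : Int) (mask : String) : Int :=
  let bitValue0 := pvBin value
  let bitValue := List.replicate (36 - bitValue0.length) '0' ++ bitValue0
  -- for i in range(0, len(mask)): append mask[i] if it is not 'X', else bitValue[i]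
  -- (getD: in-range under Pre_; Python raises IndexError out of range, excluded by Pre_)
  let resultant := (List.range mask.toList.length).foldl
    (fun acc i =>
      if mask.toList.getD i ' ' ≠ 'X' then acc ++ [mask.toList.getD i ' ']
      else acc ++ [bitValue.getD i ' ']) []
  pvParse2 resultant

-- ===== PORT B =====
-- (B also calls int(s, 2): the shared helper pvParse2 above is its port)

def getResultantValue_alt (value : Int) (mask : String) : Int :=
  let andmask := pvParse2 (mask.toList.map (fun c => if c = 'X' then '1' else c))
  let ormask  := pvParse2 (mask.toList.map (fun c => if c = 'X' then '0' else c))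
  -- Python's '>>' (arithmetic shift); the Nat subtraction truncates at 0 only where
  -- len(mask) > 36, i.e. where Python raises ValueError on the negative shift (outside Pre_)
  Int.lor (Int.land (value >>> (36 - mask.toList.length)) andmask) ormask

-- ===== PRECONDITION & SPEC =====
-- Pre_ restricts to the task's natural domain (a nonempty '0'/'1'/'X' mask of at most 36
-- characters, and a nonnegative value whenever the mask has an 'X' that reads a bit of it):
-- outside it A raises (ValueError/IndexError) on most inputs, and where it still returns
-- (masks longer than 36 chars without 'X', '_' digit separators, negative values whose bin()
-- string the padding misaligns) the value is an accident of the string padding.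
def Pre_getResultantValue (value : Int) (mask : String) : Prop :=
  (0 ≤ value ∨ 'X' ∉ mask.toList) ∧ 1 ≤ mask.toList.length ∧ mask.toList.length ≤ 36 ∧
    mask.toList.all (fun c => c == '0' || c == '1' || c == 'X') = true
instance (value : Int) (mask : String) : Decidable (Pre_getResultantValue value mask) := by
  unfold Pre_getResultantValue; infer_instance

def pvWitness_getResultantValue : Int × String := (11, "X1X0X")

def Spec_getResultantValue (value : Int) (mask : String) (out : Int) : Prop := out = getResultantValue_alt value mask
instance (value : Int) (mask : String) (out : Int) : Decidable (Spec_getResultantValue value mask out) := by unfold Spec_getResultantValue; infer_instance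

-- ===== CLAIM (what is proved, stated in full; the proofs are below) =====
def Claim_equal_getResultantValue : Prop := ∀ (value : Int) (mask : String), Dom_getResultantValue value mask → Pre_getResultantValue value mask → Spec_getResultantValue value mask (getResultantValue value mask)

-- ===== LEMMAS AND PROOFS =====

-- Nat-valued binary parse used to reason about both ports
def natParse (l : List Char) : Nat :=
  l.foldl (fun acc c => 2 * acc + (if c = '1' then 1 else 0)) 0

lemma natParse_snoc (l : List Char) (c : Char) :
    natParse (l ++ [c]) = Nat.bit (c == '1') (natParse l) := by
  simp only [natParse, List.foldl_append, List.foldl_cons, List.foldl_nil, Nat.bit_val]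
  by_cases h : c = '1' <;> simp [h]

lemma natParse_append (a : List Char) : ∀ b : List Char,
    natParse (a ++ b) = natParse a * 2 ^ b.length + natParse b := by
  intro b
  induction b using List.reverseRecOn with
  | nil => simp [natParse]
  | append_singleton b c ih =>
    rw [← List.append_assoc, natParse_snoc, natParse_snoc, ih, Nat.bit_val, Nat.bit_val]
    simp [List.length_append, pow_succ]; ring

lemma natParse_lt (l : List Char) : natParse l < 2 ^ l.length := by
  induction l using List.reverseRecOn with
  | nil => simp [natParse]
  | append_singleton b c ih =>
    rw [natParse_snoc, Nat.bit_val]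
    simp only [List.length_append, List.length_cons, List.length_nil, pow_succ]
    have : (c == '1').toNat ≤ 1 := Bool.toNat_le _
    omega

lemma natParse_take (l : List Char) (j : Nat) :
    natParse (l.take j) = natParse l / 2 ^ (l.length - j) := by
  have hd : (l.drop j).length = l.length - j := by simp
  have hsplit : natParse l
      = natParse (l.take j) * 2 ^ (l.length - j) + natParse (l.drop j) := by
    conv_lhs => rw [← List.take_append_drop j l]
    rw [natParse_append, hd]
  have hlt : natParse (l.drop j) < 2 ^ (l.length - j) := hd ▸ natParse_lt (l.drop j)
  rw [hsplit, Nat.add_comm, Nat.add_mul_div_right _ _ (Nat.two_pow_pos _),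
    Nat.div_eq_of_lt hlt, Nat.zero_add]

lemma natParse_replicate_zero (k : Nat) (l : List Char) :
    natParse (List.replicate k '0' ++ l) = natParse l := by
  induction k with
  | zero => simp
  | succ n ih =>
    have : List.replicate (n+1) '0' ++ l = '0' :: (List.replicate n '0' ++ l) := by
      simp [List.replicate_succ]
    rw [this]
    simpa [natParse] using ih

-- with no 'X' in the mask, A's loop copies the mask unchanged
lemma map_no_X (m : List Char) (bv : List Char) (n : Nat) (hm : m.length = n)
    (hx : 'X' ∉ m) :
    (List.range n).map (fun i => if m.getD i ' ' ≠ 'X' then m.getD i ' ' else bv.getD i ' ')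
      = m := by
  apply List.ext_getElem
  · simp [hm]
  · intro i h1 h2
    simp only [List.getElem_map, List.getElem_range]
    rw [List.getD_eq_getElem m ' ' h2, if_pos]
    intro hc
    exact hx (hc ▸ List.getElem_mem h2)

lemma map_replace_no_X (d : Char) (m : List Char) (hx : 'X' ∉ m) :
    m.map (fun c => if c = 'X' then d else c) = m := by
  induction m with
  | nil => rfl
  | cons c t ih =>
    simp only [List.mem_cons, not_or] at hx
    rw [List.map_cons, if_neg (fun h => hx.1 h.symm), ih hx.2]

-- bits of the AND operand never add bits: (x AND p) OR p = p, for any Int x and Nat p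
lemma nat_land_lor_self (n p : Nat) : (n &&& p) ||| p = p := by
  apply Nat.eq_of_testBit_eq
  intro i
  simp only [Nat.testBit_lor, Nat.testBit_land]
  cases n.testBit i <;> cases p.testBit i <;> rfl

lemma nat_ldiff_lor_self (n p : Nat) : Nat.ldiff p n ||| p = p := by
  apply Nat.eq_of_testBit_eq
  intro i
  simp only [Nat.testBit_lor, Nat.testBit_ldiff]
  cases n.testBit i <;> cases p.testBit i <;> rfl

lemma land_lor_self (x : Int) (p : Nat) : Int.lor (Int.land x (p : Int)) (p : Int) = (p : Int) := by
  cases x with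
  | ofNat n =>
    show Int.lor (Int.ofNat (n &&& p)) (Int.ofNat p) = Int.ofNat p
    show Int.ofNat ((n &&& p) ||| p) = Int.ofNat p
    rw [nat_land_lor_self]
  | negSucc n =>
    show Int.lor (Int.ofNat (Nat.ldiff p n)) (Int.ofNat p) = Int.ofNat p
    show Int.ofNat (Nat.ldiff p n ||| p) = Int.ofNat p
    rw [nat_ldiff_lor_self]

lemma natParse_pvBinNat (n : Nat) : natParse (pvBinNat n) = n := by
  induction n using Nat.strong_induction_on with
  | _ n ih =>
    rw [pvBinNat]
    by_cases h : n = 0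
    · simp [h, natParse]
    · rw [dif_neg h, natParse_snoc, ih (n / 2) (Nat.div_lt_self (Nat.pos_of_ne_zero h) (by decide)),
        Nat.bit_val]
      rcases Nat.mod_two_eq_zero_or_one n with h2 | h2 <;> simp [h2] <;> omega

lemma pvBinNat_length_le (k : Nat) : ∀ n : Nat, n < 2 ^ k → (pvBinNat n).length ≤ k := by
  induction k with
  | zero => intro n hn; interval_cases n; simp [pvBinNat]
  | succ k ih =>
    intro n hn
    rw [pvBinNat]
    by_cases h : n = 0
    · simp [h]
    · rw [dif_neg h]
      have hk : 2 ^ (k + 1) = 2 * 2 ^ k := by ring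
      have : n / 2 < 2 ^ k := by omega
      have := ih (n / 2) this
      simp [List.length_append]; omega

-- the single LSB step: bitwise ops commute with peeling the last binary digit
lemma bit_step (v : Nat) (a o : Bool) (A O : Nat) :
    (v &&& Nat.bit a A) ||| Nat.bit o O
      = Nat.bit ((v.testBit 0 && a) || o) ((v / 2 &&& A) ||| O) := by
  conv_lhs => rw [← Nat.bit_testBit_zero_shiftRight_one v]
  rw [Nat.land_bit, Nat.lor_bit, Nat.shiftRight_one]

-- the heart of the equivalence: parsing the character-wise combination equals
-- (value AND andmask) OR ormask, for mask and bit string of equal length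
lemma key (m : List Char) : ∀ bv : List Char, m.length = bv.length →
    natParse (List.zipWith (fun c b => if c ≠ 'X' then c else b) m bv)
      = (natParse bv &&& natParse (m.map (fun c => if c = 'X' then '1' else c)))
          ||| natParse (m.map (fun c => if c = 'X' then '0' else c)) := by
  induction m using List.reverseRecOn with
  | nil =>
    intro bv h
    have : bv = [] := List.eq_nil_of_length_eq_zero h.symm
    simp [this, natParse]
  | append_singleton m' c ih =>
    intro bv h
    have hne : bv ≠ [] := by
      intro hbv; rw [hbv] at h; simp at h
    obtain ⟨bv', b, rfl⟩ : ∃ bv' b, bv = bv' ++ [b] :=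
      ⟨bv.dropLast, bv.getLast hne, (List.dropLast_append_getLast hne).symm⟩
    have hlen : m'.length = bv'.length := by
      simp [List.length_append] at h; omega
    rw [List.zipWith_append hlen, List.map_append, List.map_append]
    simp only [List.zipWith_cons_cons, List.zipWith_nil_right, List.map_cons, List.map_nil]
    rw [natParse_snoc, natParse_snoc, natParse_snoc, natParse_snoc, bit_step,
      Nat.testBit_bit_zero, Nat.bit_div_two, ih bv' hlen]
    by_cases hc : c = 'X' <;> simp [hc] <;> cases hb : (b == '1') <;> simp

-- the Int-valued parse in the ports is the cast of natParse
lemma parse_cast (l : List Char) : ∀ a : Nat,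
    l.foldl (fun acc c => acc * 2 + (if c = '1' then 1 else 0)) (a : Int)
      = ((l.foldl (fun acc c => 2 * acc + (if c = '1' then 1 else 0)) a : Nat) : Int) := by
  induction l with
  | nil => intro a; simp
  | cons c t ih =>
    intro a
    simp only [List.foldl_cons]
    have : (a : Int) * 2 + (if c = '1' then 1 else 0)
        = ((2 * a + (if c = '1' then 1 else 0) : Nat) : Int) := by
      split <;> push_cast <;> ring
    rw [this, ih]

lemma pvParse2_eq (l : List Char) : pvParse2 l = (natParse l : Int) := parse_cast l 0

-- A's index loop builds exactly the character-wise zip of mask and padded bit string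
lemma loop_append (p : Nat → Prop) [DecidablePred p] (g h : Nat → Char) :
    ∀ (n : Nat) (acc : List Char),
    (List.range n).foldl (fun a i => if p i then a ++ [g i] else a ++ [h i]) acc
      = acc ++ (List.range n).map (fun i => if p i then g i else h i) := by
  intro n
  induction n with
  | zero => intro acc; simp
  | succ n ih =>
    intro acc
    rw [List.range_succ, List.foldl_append, List.map_append, ih]
    by_cases hp : p n <;> simp [hp]

lemma range_map_zip (m bv : List Char) (n : Nat) (hm : m.length = n) (hb : n ≤ bv.length) :
    (List.range n).map (fun i => if m.getD i ' ' ≠ 'X' then m.getD i ' ' else bv.getD i ' ')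
      = List.zipWith (fun c b => if c ≠ 'X' then c else b) m (bv.take n) := by
  apply List.ext_getElem
  · simp only [List.length_map, List.length_range, List.length_zipWith, List.length_take, hm]
    omega
  · intro i h1 h2
    simp only [List.getElem_map, List.getElem_range, List.getElem_zipWith, List.getElem_take]
    have him : i < m.length := by simp at h1; omega
    have hib : i < bv.length := by simp at h1; omega
    rw [List.getD_eq_getElem m ' ' him, List.getD_eq_getElem bv ' ' hib]

lemma natParse_pvBin (v : Int) (hv : 0 ≤ v) (k : Nat) :
    natParse (List.replicate k '0' ++ pvBin v) = v.toNat := by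
  rw [natParse_replicate_zero, pvBin, if_neg (by omega)]
  by_cases h : v = 0
  · simp [h, natParse]
  · rw [if_neg h, natParse_pvBinNat]

lemma pvBin_length_le (v : Int) (hv : 0 ≤ v) (hb : v ≤ 2147483648) :
    (pvBin v).length ≤ 36 := by
  rw [pvBin, if_neg (by omega)]
  by_cases h : v = 0
  · simp [h]
  · rw [if_neg h]
    exact pvBinNat_length_le 36 v.toNat (by omega)

-- ===== VERDICT (by name: the statement is the Claim_ definition above) =====
theorem getResultantValue_spec : Claim_equal_getResultantValue := by
  intro value mask hdom hpre
  obtain ⟨hvor, hlen1, hlen36, _⟩ := hpre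
  have hbnd : value ≤ 2147483648 := by
    unfold Dom_getResultantValue pvDomInt at hdom
    simp only [Bool.and_eq_true, decide_eq_true_eq] at hdom
    exact hdom.1.2
  unfold Spec_getResultantValue getResultantValue getResultantValue_alt
  simp only []
  rcases hvor with hv | hnx
  case inr =>
    rw [loop_append, List.nil_append, map_no_X mask.toList _ mask.toList.length rfl hnx,
      map_replace_no_X '1' mask.toList hnx, map_replace_no_X '0' mask.toList hnx,
      pvParse2_eq]
    exact (land_lor_self (value >>> (36 - mask.toList.length)) (natParse mask.toList)).symm
  have hlb : (pvBin value).length ≤ 36 := pvBin_length_le value hv hbnd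
  have hpadlen : (List.replicate (36 - (pvBin value).length) '0' ++ pvBin value).length = 36 := by
    simp [List.length_append, List.length_replicate]; omega
  set bv := List.replicate (36 - (pvBin value).length) '0' ++ pvBin value with hbv
  set L := mask.toList.length with hL
  rw [loop_append, List.nil_append,
    range_map_zip mask.toList bv L rfl (by omega),
    pvParse2_eq, pvParse2_eq, pvParse2_eq,
    key mask.toList (bv.take L) (by simp only [List.length_take, hpadlen]; omega),
    natParse_take bv L, hpadlen, natParse_pvBin value hv]
  have hval : value = ((value.toNat : Nat) : Int) := (Int.toNat_of_nonneg hv).symm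
  rw [hval, ← Nat.shiftRight_eq_div_pow]
  rfl
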